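-- pv_equiv track=rewrite | github.com/marfraTUC/micropython_solar_panel | util.py | bit_length
-- ===== SOURCE A (Python) =====
-- def bit_length(n):
--     """Return the number of bits required to represent an integer."""
--     if n == 0:
--         return 0
--     bits = 0
--     while n > 0:
--         bits += 1
--         n >>= 1
--     return bits
-- ===== SOURCE B (Python) =====
-- def bit_length(n):
--     """Return the number of bits required to represent an integer."""
--     if n <= 0:
--         return 0
--     return len(bin(n)) - 2
-- ===== Notes on version B (the rewrite author's own statement) =====
-- stated objective: simpler
-- what changed: Replaces the shift-and-count loop and accumulator with a guard plus reading the bit count off the length of the binary string representation (len(bin(n)) - 2).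
import Mathlib
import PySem

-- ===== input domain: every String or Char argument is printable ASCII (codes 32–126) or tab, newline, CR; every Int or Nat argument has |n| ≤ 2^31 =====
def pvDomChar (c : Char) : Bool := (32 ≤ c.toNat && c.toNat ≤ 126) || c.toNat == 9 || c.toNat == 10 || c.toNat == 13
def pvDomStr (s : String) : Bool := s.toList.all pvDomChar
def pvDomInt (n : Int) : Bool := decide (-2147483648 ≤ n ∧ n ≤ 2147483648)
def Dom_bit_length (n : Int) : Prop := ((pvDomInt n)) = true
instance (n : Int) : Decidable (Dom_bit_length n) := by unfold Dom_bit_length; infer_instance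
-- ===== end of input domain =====

-- B replaces A's shift-and-count loop with a guard plus the length of the binary string (len(bin(n)) - 2); objective: simpler.


-- ===== PORT A =====
-- the `while n > 0: bits += 1; n >>= 1` loop; `n >>= 1` on int is floor division by 2
def bitLoopA (n : Int) (bits : Int) : Int :=
  if h : n > 0 then bitLoopA (PySem.Int.floordiv n 2) (bits + 1) else bits
termination_by n.toNat
decreasing_by
  rw [PySem.Int.floordiv_eq_ediv_of_pos (by norm_num)]
  omega

def bit_length (n : Int) : Int :=
  if n == 0 then 0
  else bitLoopA n 0

-- ===== PORT B =====
-- digits of bin(m) after the '0b' prefix, for m > 0 (CPython builds them most-significant-first)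
def binDigits (m : Nat) : List Char :=
  if m = 0 then [] else binDigits (m / 2) ++ [if m % 2 = 1 then '1' else '0']

-- Source B: if n <= 0: return 0; return len(bin(n)) - 2   (bin(n) = "0b" ++ digits)
def bit_length_alt (n : Int) : Int :=
  if n ≤ 0 then 0
  else (Int.ofNat ('0' :: 'b' :: binDigits n.toNat).length) - 2

-- ===== PRECONDITION & SPEC =====
def Spec_bit_length (n : Int) (out : Int) : Prop := out = bit_length_alt n
instance (n : Int) (out : Int) : Decidable (Spec_bit_length n out) := by unfold Spec_bit_length; infer_instance

-- ===== CLAIM (what is proved, stated in full; the proofs are below) =====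
def Claim_equal_bit_length : Prop := ∀ (n : Int), Dom_bit_length n → Spec_bit_length n (bit_length n)

-- ===== LEMMAS AND PROOFS =====
theorem bitLoopA_eq (m : Nat) : ∀ bits : Int, bitLoopA (m : Int) bits = bits + (binDigits m).length := by
  induction m using Nat.strong_induction_on with
  | _ m ih =>
    intro bits
    unfold bitLoopA
    rw [binDigits]
    by_cases hm : m = 0
    · subst hm; simp
    · have hpos : ((m : Int)) > 0 := by omega
      rw [dif_pos hpos]
      have hfd : PySem.Int.floordiv (m : Int) 2 = ((m / 2 : Nat) : Int) :=
        PySem.Int.floordiv_natCast m 2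
      rw [hfd, ih (m / 2) (by omega)]
      simp [hm]
      omega

theorem bit_length_spec : Claim_equal_bit_length := by
  intro n _
  unfold Spec_bit_length bit_length bit_length_alt
  by_cases h0 : n = 0
  · simp [h0]
  · rw [if_neg (by simpa using h0)]
    by_cases hneg : n ≤ 0
    · rw [if_pos hneg]
      unfold bitLoopA
      rw [dif_neg (by omega)]
    · rw [if_neg hneg]
      obtain ⟨m, rfl⟩ : ∃ m : Nat, n = (m : Int) := ⟨n.toNat, by omega⟩
      rw [bitLoopA_eq]
      simp
      omega
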